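-- pv_equiv track=rewrite | github.com/Yocandit/mcloader-bot | main.py | edited_links
-- ===== SOURCE A (Python) =====
-- def edited_links(nums, message):
--     if nums != None :
--         url = message[6:-(len(nums)+2)]
--         check = nums
--         if '-' in check and ',' not in check:
--             nums = numbers(nums)
--             edit_links = [i for i in range(int(nums[0]),int(nums[-1])+1)]
--         elif ',' in check and '-' not in check :
--             edit_links = numbers(nums)
--         else:
--             edit_links = nums.split(',')
--             for i in edit_links:
--                 if len(i) >= 3 :
--                     nums = i
--                     break
--             nums = numbers(nums)
--             edit_links = [i for i in range(int(nums[0]),int(nums[-1])+1)]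
--     else :
--         url = message[6:]
--         edit_links = None
--
--     return edit_links, url
--
-- def numbers(nums):
--     l = len(nums)
--     integ = []
--     i = 0
--     while i < l:
--        num_int = ''
--        a = nums[i]
--        while '0' <= a <= '9':
--           num_int += a
--           i += 1
--           if i < l:
--              a = nums[i]
--           else:
--              break
--        i += 1
--        if num_int != '':
--           integ.append(int(num_int))
--
--     return sorted(integ)
-- ===== SOURCE B (Python) =====
-- def _vals(s):
--     # staged: mask every non-digit to a space, split on whitespace, parse each token
--     masked = ''.join(c if '0' <= c <= '9' else ' ' for c in s)
--     return [int(t) for t in masked.split()]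
--
-- def edited_links(nums, message):
--     if nums is None:
--         return None, message[6:]
--     url = message[6:-(len(nums) + 2)]
--     if ',' in nums and '-' not in nums:
--         return sorted(_vals(nums)), url
--     # both range branches: source string is the first comma chunk of len>=3, else nums itself
--     src = next((p for p in nums.split(',') if len(p) >= 3), nums)
--     vals = _vals(src)
--     return list(range(min(vals), max(vals) + 1)), url
-- ===== Notes on version B (the rewrite author's own statement) =====
-- stated objective: simpler
-- what changed: Tokenization is restructured from A's hand-written index-based nested-while scanner into staged whole-string passes (mask every non-digit to a space, str.split(), int() each token), the range branches take min()/max() of the unsorted values directly instead of sorting and indexing the ends, and A's two range branches are merged into one (the comma-chunk selection is a no-op when the string has no comma).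
import Mathlib
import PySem

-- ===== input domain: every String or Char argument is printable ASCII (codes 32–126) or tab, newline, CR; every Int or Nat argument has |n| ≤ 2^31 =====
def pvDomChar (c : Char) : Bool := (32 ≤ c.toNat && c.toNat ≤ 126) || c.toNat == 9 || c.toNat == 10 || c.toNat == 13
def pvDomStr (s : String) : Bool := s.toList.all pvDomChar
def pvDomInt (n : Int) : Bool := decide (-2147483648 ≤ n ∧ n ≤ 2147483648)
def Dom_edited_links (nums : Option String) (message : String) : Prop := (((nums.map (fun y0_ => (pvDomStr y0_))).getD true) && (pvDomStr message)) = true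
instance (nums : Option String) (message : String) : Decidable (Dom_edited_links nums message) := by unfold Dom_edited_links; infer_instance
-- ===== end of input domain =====

-- B replaces A's index-based nested-while digit scanner by staged passes (mask non-digits to
-- spaces, split on whitespace, parse each token) and replaces sort-then-index-ends by direct
-- min/max in the range branches, merging A's two range branches into one (objective: simpler).

-- ===== PORT A =====
def pvDigit (c : Char) : Bool := decide ('0' ≤ c) && decide (c ≤ '9')

-- int(t) where t is a NONEMPTY run of ASCII digits: hand-ported as the decimal fold,
-- exact on exactly those strings (no sign/space/underscore can occur there). Used by both ports.
def pvDigitsVal (ds : List Char) : Int := ds.foldl (fun v c => v * 10 + ((c.toNat : Int) - 48)) 0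

-- inner `while '0' <= a <= '9'` loop of `numbers`: collects the digit run, returns the rest
def pvTakeNum : List Char → List Char → List Char × List Char
  | [], num => (num, [])
  | c :: cs, num => if pvDigit c then pvTakeNum cs (num ++ [c]) else (num, c :: cs)

lemma pvTakeNum_snd_len : ∀ (l num : List Char), (pvTakeNum l num).2.length ≤ l.length
  | [], _ => by simp [pvTakeNum]
  | c :: cs, num => by
    by_cases h : pvDigit c = true
    · simpa [pvTakeNum, h] using Nat.le_succ_of_le (pvTakeNum_snd_len cs (num ++ [c]))
    · simp [pvTakeNum, h]

-- outer `while i < l` loop of `numbers` (i += 1 after the inner loop = drop one char of the rest)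
def pvNumbersGo : List Char → List Int → List Int
  | [], integ => integ
  | c :: cs, integ =>
    let r := pvTakeNum (c :: cs) []
    pvNumbersGo r.2.tail (if r.1 ≠ [] then integ ++ [pvDigitsVal r.1] else integ)
termination_by l _ => l.length
decreasing_by
  have h := pvTakeNum_snd_len (c :: cs) []
  simp only [List.length_cons, List.length_tail] at *
  omega

def pvNumbers (s : String) : List Int :=
  PySem.List.sorted (pvNumbersGo s.toList []) (fun x => x) false

-- `for i in edit_links: if len(i) >= 3: nums = i; break`
def pvFirstLong : List String → String → String
  | [], nums => nums
  | i :: rest, nums => if 3 ≤ PySem.Str.len i then i else pvFirstLong rest nums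

def edited_links (nums : Option String) (message : String) : Option (List Int) × String :=
  match nums with
  | some check =>
    let url := PySem.Str.slice message (some 6) (some (-(PySem.Str.len check + 2)))
    if PySem.Str.isIn "-" check && !PySem.Str.isIn "," check then
      let ns := pvNumbers check
      -- int(nums[0]), int(nums[-1]) on a list of ints are the elements themselves; Pre_ excludes ns = []
      (some (PySem.List.pyRange ((PySem.List.pyGet? ns 0).getD 0) ((PySem.List.pyGet? ns (-1)).getD 0 + 1) 1), url)
    else if PySem.Str.isIn "," check && !PySem.Str.isIn "-" check then
      (some (pvNumbers check), url)
    else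
      let parts := (PySem.Str.split? check ",").getD []   -- sep "," ≠ "" so split? is always some
      let nums2 := pvFirstLong parts check
      let ns := pvNumbers nums2
      (some (PySem.List.pyRange ((PySem.List.pyGet? ns 0).getD 0) ((PySem.List.pyGet? ns (-1)).getD 0 + 1) 1), url)
  | none => (none, PySem.Str.slice message (some 6) none)

-- ===== PORT B =====
-- masked = ''.join(c if '0' <= c <= '9' else ' ' for c in s)
def pvMask (cs : List Char) : List Char := cs.map (fun c => if ('0' ≤ c && c ≤ '9') = true then c else ' ')

-- [int(t) for t in masked.split()] ; each token is a nonempty digit run, int ported as pvDigitsVal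
def pvValsAlt (s : String) : List Int := (PySem.Chars.split₀ (pvMask s.toList)).map pvDigitsVal

def edited_links_alt (nums : Option String) (message : String) : Option (List Int) × String :=
  match nums with
  | none => (none, PySem.Str.slice message (some 6) none)
  | some s =>
    let url := PySem.Str.slice message (some 6) (some (-(PySem.Str.len s + 2)))
    if PySem.Str.isIn "," s && !PySem.Str.isIn "-" s then
      (some (PySem.List.sorted (pvValsAlt s) (fun x => x) false), url)
    else
      -- src = next((p for p in nums.split(',') if len(p) >= 3), nums)
      let src := ((((PySem.Str.split? s ",").getD []).find? (fun p => decide (3 ≤ PySem.Str.len p))).getD s)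
      let vals := pvValsAlt src
      (some (PySem.List.pyRange ((PySem.List.min? vals (fun x => x)).getD 0)
                                ((PySem.List.max? vals (fun x => x)).getD 0 + 1) 1), url)

-- ===== PRECONDITION & SPEC =====
-- Pre_ excludes exactly the inputs on which Python A raises IndexError (and B ValueError): those
-- where the string the range branches parse (the whole string, or the first len>=3 comma chunk)
-- contains no ASCII digit.
def Pre_edited_links (nums : Option String) (message : String) : Prop :=
  (match nums with
   | none => true
   | some s =>
     if PySem.Str.isIn "-" s && !PySem.Str.isIn "," s then
       s.toList.any (fun c => decide ('0' ≤ c) && decide (c ≤ '9'))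
     else if PySem.Str.isIn "," s && !PySem.Str.isIn "-" s then true
     else
       (((((PySem.Str.split? s ",").getD []).find? (fun p => decide (3 ≤ PySem.Str.len p))).getD s)).toList.any
         (fun c => decide ('0' ≤ c) && decide (c ≤ '9'))) = true
instance (nums : Option String) (message : String) : Decidable (Pre_edited_links nums message) := by
  unfold Pre_edited_links; infer_instance

def pvWitness_edited_links : Option String × String := (some "1-3", "!load 1-3")

def Spec_edited_links (nums : Option String) (message : String) (out : Option (List Int) × String) : Prop := out = edited_links_alt nums message
instance (nums : Option String) (message : String) (out : Option (List Int) × String) : Decidable (Spec_edited_links nums message out) := by unfold Spec_edited_links; infer_instance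

-- ===== CLAIM (what is proved, stated in full; the proofs are below) =====
def Claim_equal_edited_links : Prop := ∀ (nums : Option String) (message : String), Dom_edited_links nums message → Pre_edited_links nums message → Spec_edited_links nums message (edited_links nums message)

-- ===== LEMMAS AND PROOFS =====
lemma pvTakeNum_eq (l : List Char) : ∀ num, pvTakeNum l num = (num ++ l.takeWhile pvDigit, l.dropWhile pvDigit) := by
  induction l with
  | nil => intro num; simp [pvTakeNum]
  | cons c cs ih =>
    intro num
    by_cases h : pvDigit c = true
    · simp [pvTakeNum, h, ih]
    · simp [pvTakeNum, h]

lemma pvNumbersGo_nil (integ : List Int) : pvNumbersGo [] integ = integ := by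
  simp [pvNumbersGo]

lemma pvNumbersGo_cons_nondigit {c : Char} (h : pvDigit c = false) (cs : List Char) (integ : List Int) :
    pvNumbersGo (c :: cs) integ = pvNumbersGo cs integ := by
  rw [pvNumbersGo]
  simp [pvTakeNum_eq, h]

lemma pvNumbersGo_cons_digit {c : Char} (h : pvDigit c = true) (cs : List Char) (integ : List Int) :
    pvNumbersGo (c :: cs) integ =
      pvNumbersGo (cs.dropWhile pvDigit).tail (integ ++ [pvDigitsVal (c :: cs.takeWhile pvDigit)]) := by
  rw [pvNumbersGo]
  simp [pvTakeNum_eq, h]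

lemma pvDigit_not_space {c : Char} (h : pvDigit c = true) : PySem.Chars.isspace c = false := by
  simp only [pvDigit, Bool.and_eq_true, decide_eq_true_eq, Char.le_def] at h
  have h1 : 48 ≤ c.toNat := h.1
  have h2 : c.toNat ≤ 57 := h.2
  simp [PySem.Chars.isspace]
  omega

lemma pvMask_cons (c : Char) (cs : List Char) :
    pvMask (c :: cs) = (if pvDigit c = true then c else ' ') :: pvMask cs := by
  simp [pvMask, pvDigit]

-- joint invariant of split₀.go over the masked string vs A's outer loop: from a fresh token state
-- it runs A's outer loop; from a partial (reversed) token it finishes the current digit run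
lemma pvSplitGo_eq_go : ∀ (cs : List Char),
    (∀ acc, (PySem.Chars.split₀.go (pvMask cs) [] acc).map pvDigitsVal
        = pvNumbersGo cs (acc.reverse.map pvDigitsVal))
    ∧ (∀ (cur : List Char) acc, cur ≠ [] →
        (PySem.Chars.split₀.go (pvMask cs) cur acc).map pvDigitsVal
        = pvNumbersGo (cs.dropWhile pvDigit).tail
            ((acc.reverse.map pvDigitsVal) ++ [pvDigitsVal (cur.reverse ++ cs.takeWhile pvDigit)])) := by
  intro cs
  induction cs with
  | nil =>
    constructor
    · intro acc; simp [pvMask, PySem.Chars.split₀.go, pvNumbersGo_nil]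
    · intro cur acc hcur
      simp [pvMask, PySem.Chars.split₀.go, pvNumbersGo_nil, List.isEmpty_iff, hcur]
  | cons c cs ih =>
    constructor
    · intro acc
      rw [pvMask_cons]
      by_cases h : pvDigit c = true
      · rw [if_pos h]
        rw [PySem.Chars.split₀.go, if_neg (by simp [pvDigit_not_space h])]
        rw [ih.2 [c] acc (by simp)]
        rw [pvNumbersGo_cons_digit h]
        simp
      · rw [if_neg h]
        rw [PySem.Chars.split₀.go, if_pos (show PySem.Chars.isspace ' ' = true by decide)]
        simp only [List.isEmpty_nil, if_true]
        rw [ih.1 acc, pvNumbersGo_cons_nondigit (by simpa using h)]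
    · intro cur acc hcur
      rw [pvMask_cons]
      by_cases h : pvDigit c = true
      · rw [if_pos h]
        rw [PySem.Chars.split₀.go, if_neg (by simp [pvDigit_not_space h])]
        rw [ih.2 (c :: cur) acc (by simp)]
        simp [h]
      · rw [if_neg h]
        rw [PySem.Chars.split₀.go, if_pos (show PySem.Chars.isspace ' ' = true by decide)]
        rw [if_neg (by simpa [List.isEmpty_iff] using hcur)]
        rw [ih.1]
        simp [h]

lemma pvValsAlt_eq_go (s : String) : pvValsAlt s = pvNumbersGo s.toList [] := by
  unfold pvValsAlt PySem.Chars.split₀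
  simpa using (pvSplitGo_eq_go s.toList).1 []

lemma pvNumbersGo_ne_nil : ∀ (n : Nat) (cs : List Char) (integ : List Int),
    cs.length ≤ n → (integ ≠ [] ∨ cs.any pvDigit = true) → pvNumbersGo cs integ ≠ [] := by
  intro n
  induction n with
  | zero =>
    intro cs integ hlen hor
    have hnil : cs = [] := List.length_eq_zero_iff.mp (Nat.le_zero.mp hlen)
    subst hnil
    rcases hor with h | h
    · simpa [pvNumbersGo_nil] using h
    · simp at h
  | succ n ih =>
    intro cs integ hlen hor
    match cs with
    | [] =>
      rcases hor with h | h
      · simpa [pvNumbersGo_nil] using h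
      · simp at h
    | c :: cs' =>
      by_cases h : pvDigit c = true
      · rw [pvNumbersGo_cons_digit h]
        apply ih
        · have := List.length_dropWhile_le pvDigit cs'
          simp only [List.length_cons] at hlen
          simp only [List.length_tail]
          omega
        · left; simp
      · rw [pvNumbersGo_cons_nondigit (by simpa using h)]
        apply ih
        · simpa using Nat.le_of_succ_le_succ hlen
        · rcases hor with h2 | h2
          · exact Or.inl h2
          · right; simpa [h] using h2

-- `s.split(',')` when ',' does not occur in s is [s]
lemma pvSplitOn_go_no_occur (sep : List Char) :
    ∀ (fuel : Nat) (l cur : List Char) (acc : List (List Char)),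
      (∀ j, ¬ sep <+: l.drop j) →
      PySem.Chars.splitOn.go sep fuel l cur acc = ((cur.reverse ++ l) :: acc).reverse := by
  intro fuel
  induction fuel with
  | zero => intro l cur acc _; rw [PySem.Chars.splitOn.go]
  | succ fuel ih =>
    intro l cur acc hno
    match l with
    | [] =>
      rw [PySem.Chars.splitOn.go]
      simp
      omega
    | c :: rest =>
      rw [PySem.Chars.splitOn.go]
      rw [if_neg (by
        intro hpre
        exact hno 0 (by simpa using (List.isPrefixOf_iff_prefix.mp hpre)))]
      rw [ih rest (c :: cur) acc (fun j => by simpa using hno (j + 1))]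
      simp

lemma pvSplit_no_comma (s : String) (h : PySem.Str.isIn "," s = false) :
    PySem.Str.split? s "," = some [s] := by
  have hinf : ¬ [','] <:+: s.toList := by
    simpa using (PySem.Chars.isIn_eq_false_iff (sub := ",".toList) (s := s.toList)).mp (by simpa using h)
  have hgo : PySem.Chars.splitOn s.toList [','] = [s.toList] := by
    unfold PySem.Chars.splitOn
    rw [pvSplitOn_go_no_occur [','] (s.toList.length + 1) s.toList [] [] (by
      intro j hpre
      exact hinf (hpre.isInfix.trans (List.drop_suffix j s.toList).isInfix))]
    simp
  simp [PySem.Str.split?, PySem.Chars.split?, hgo]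

lemma pvFindSingleton (p : String → Bool) (x : String) : (List.find? p [x]).getD x = x := by
  cases hp : p x <;> simp [List.find?, hp]

-- first element of sorted(l) is min(l), last is max(l)
lemma pvSortedFirst (l : List Int) (h : l ≠ []) :
    (PySem.List.pyGet? (PySem.List.sorted l (fun x => x) false) 0).getD 0
      = (PySem.List.min? l (fun x => x)).getD 0 := by
  obtain ⟨m, hm⟩ : ∃ m, PySem.List.min? l (fun x => x) = some m := by
    cases hmin : PySem.List.min? l (fun x => x) with
    | none => exact absurd ((PySem.List.min?_eq_none_iff l _).mp hmin) h
    | some m => exact ⟨m, rfl⟩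
  have hperm := PySem.List.sorted_perm l (fun x => x) false
  have hsne : PySem.List.sorted l (fun x => x) false ≠ [] := by
    simpa [PySem.List.sorted_eq_nil_iff] using h
  have hlen : 0 < (PySem.List.sorted l (fun x => x) false).length := List.length_pos_iff.mpr hsne
  have h0mem : (PySem.List.sorted l (fun x => x) false)[0] ∈ l :=
    hperm.mem_iff.mp (List.getElem_mem hlen)
  have hle1 : m ≤ (PySem.List.sorted l (fun x => x) false)[0] :=
    PySem.List.min?_isMin hm _ h0mem
  obtain ⟨j, hj, hje⟩ := List.mem_iff_getElem.mp (hperm.mem_iff.mpr (PySem.List.min?_mem hm))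
  have hle2 : (PySem.List.sorted l (fun x => x) false)[0] ≤ m := by
    rw [← hje]; exact PySem.List.sorted_id_getElem_mono l (Nat.zero_le j) hj
  have heq : (PySem.List.sorted l (fun x => x) false)[0] = m := le_antisymm hle2 hle1
  have hidx : PySem.List.pyIdx? (PySem.List.sorted l (fun x => x) false).length 0 = some 0 := by
    simp only [PySem.List.pyIdx?]
    rw [if_pos le_rfl, if_pos (by exact_mod_cast hlen)]
    rfl
  unfold PySem.List.pyGet?
  rw [hidx, hm]
  simp [List.getElem?_eq_getElem hlen, heq]

lemma pvSortedLast (l : List Int) (h : l ≠ []) :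
    (PySem.List.pyGet? (PySem.List.sorted l (fun x => x) false) (-1)).getD 0
      = (PySem.List.max? l (fun x => x)).getD 0 := by
  obtain ⟨m, hm⟩ : ∃ m, PySem.List.max? l (fun x => x) = some m := by
    cases hmax : PySem.List.max? l (fun x => x) with
    | none => exact absurd ((PySem.List.max?_eq_none_iff l _).mp hmax) h
    | some m => exact ⟨m, rfl⟩
  have hperm := PySem.List.sorted_perm l (fun x => x) false
  have hlenEq := PySem.List.length_sorted l (fun x => x) false
  have hl0 : 0 < l.length := List.length_pos_iff.mpr h
  have hlast : l.length - 1 < (PySem.List.sorted l (fun x => x) false).length := by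
    rw [hlenEq]; omega
  have h0mem : (PySem.List.sorted l (fun x => x) false)[l.length - 1] ∈ l :=
    hperm.mem_iff.mp (List.getElem_mem hlast)
  have hle1 : (PySem.List.sorted l (fun x => x) false)[l.length - 1] ≤ m :=
    PySem.List.max?_isMax hm _ h0mem
  obtain ⟨j, hj, hje⟩ := List.mem_iff_getElem.mp (hperm.mem_iff.mpr (PySem.List.max?_mem hm))
  have hle2 : m ≤ (PySem.List.sorted l (fun x => x) false)[l.length - 1] := by
    rw [← hje]
    exact PySem.List.sorted_id_getElem_mono l (by rw [hlenEq] at hj; omega) hlast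
  have heq : (PySem.List.sorted l (fun x => x) false)[l.length - 1] = m := le_antisymm hle1 hle2
  have hidx : PySem.List.pyIdx? (PySem.List.sorted l (fun x => x) false).length (-1)
      = some (l.length - 1) := by
    rw [hlenEq]
    simp only [PySem.List.pyIdx?]
    rw [if_neg (by omega), if_pos (by omega)]
    rfl
  unfold PySem.List.pyGet?
  rw [hidx, hm]
  simp [List.getElem?_eq_getElem hlast, heq]

-- the common range-branch value: A's sorted-ends form = B's min/max form, given a digit in t
lemma pvRangeBranch (t : String)
    (h : t.toList.any (fun c => decide ('0' ≤ c) && decide (c ≤ '9')) = true) :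
    PySem.List.pyRange ((PySem.List.pyGet? (pvNumbers t) 0).getD 0)
        ((PySem.List.pyGet? (pvNumbers t) (-1)).getD 0 + 1) 1
      = PySem.List.pyRange ((PySem.List.min? (pvValsAlt t) (fun x => x)).getD 0)
        ((PySem.List.max? (pvValsAlt t) (fun x => x)).getD 0 + 1) 1 := by
  have hne : pvNumbersGo t.toList [] ≠ [] :=
    pvNumbersGo_ne_nil t.toList.length t.toList [] le_rfl (Or.inr (by simpa [pvDigit] using h))
  rw [pvValsAlt_eq_go]
  unfold pvNumbers
  rw [pvSortedFirst _ hne, pvSortedLast _ hne]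

lemma pvFirstLong_eq (l : List String) (orig : String) :
    pvFirstLong l orig = (l.find? (fun p => decide (3 ≤ PySem.Str.len p))).getD orig := by
  induction l with
  | nil => simp [pvFirstLong]
  | cons x xs ih =>
    simp only [pvFirstLong, List.find?]
    by_cases h : 3 ≤ PySem.Str.len x
    · rw [decide_eq_true h, if_pos h]; rfl
    · rw [decide_eq_false h, if_neg h]; exact ih

-- ===== VERDICT (by name: the statement is the Claim_ definition above) =====
theorem edited_links_spec : Claim_equal_edited_links := by
  intro nums message _hdom hpre
  unfold Spec_edited_links
  match nums with
  | none => rfl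
  | some s =>
    unfold Pre_edited_links at hpre
    simp only [edited_links, edited_links_alt]
    cases hd : PySem.Str.isIn "-" s <;> cases hk : PySem.Str.isIn "," s <;>
      simp only [hd, hk] at hpre ⊢
    · -- neither comma nor dash: A else branch, B else branch
      rw [if_neg (show ¬((false && !false) = true) by decide),
          if_neg (show ¬((false && !false) = true) by decide)] at hpre ⊢
      rw [if_neg (show ¬((false && !false) = true) by decide)]
      rw [pvFirstLong_eq, pvRangeBranch _ hpre]
    · -- comma only: A middle branch, B sorted branch
      rw [if_neg (show ¬((false && !true) = true) by decide),
          if_pos (show (true && !false) = true by decide),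
          if_pos (show (true && !false) = true by decide)]
      rw [pvValsAlt_eq_go]
      rfl
    · -- dash only: A first branch, B else branch with src = s
      rw [if_pos (show (true && !false) = true by decide)] at hpre
      rw [if_pos (show (true && !false) = true by decide),
          if_neg (show ¬((false && !true) = true) by decide)]
      rw [pvSplit_no_comma s hk]
      simp only [Option.getD_some]
      rw [pvFindSingleton, pvRangeBranch _ hpre]
    · -- both: A else branch, B else branch
      rw [if_neg (show ¬((true && !true) = true) by decide),
          if_neg (show ¬((true && !true) = true) by decide)] at hpre ⊢
      rw [if_neg (show ¬((true && !true) = true) by decide)]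
      rw [pvFirstLong_eq, pvRangeBranch _ hpre]
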